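-- pv_equiv track=rewrite | github.com/himasrikatam/marketing_automation | email_agent.py | _run
-- ===== SOURCE A (Python) =====
-- def _run(email:str)-> str:
--     # Example implementation, replace with actual logic
--     jargon_dict = {
--         "WIP": "work in progress",
--         "ASAP": "as soon as possible",
--         "FYI": "for your information"
--     }
--     for jargon, replacement in jargon_dict.items():
--         email = email.replace(jargon, replacement)
--     return email
-- ===== SOURCE B (Python) =====
-- def _run(email: str) -> str:
--     # Single left-to-right scan: at each position replace the first matching
--     # jargon abbreviation, instead of three full passes over the string.
--     out = []
--     i = 0
--     n = len(email)
--     while i < n: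
--         if email.startswith("WIP", i):
--             out.append("work in progress")
--             i += 3
--         elif email.startswith("ASAP", i):
--             out.append("as soon as possible")
--             i += 4
--         elif email.startswith("FYI", i):
--             out.append("for your information")
--             i += 3
--         else:
--             out.append(email[i])
--             i += 1
--     return "".join(out)
-- ===== Notes on version B (the rewrite author's own statement) =====
-- stated objective: alternative
-- what changed: Replaces the three sequential full-string .replace passes with a single left-to-right scan that tests the three abbreviations at each position and emits the replacement (or the character) once.
import Mathlib
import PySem

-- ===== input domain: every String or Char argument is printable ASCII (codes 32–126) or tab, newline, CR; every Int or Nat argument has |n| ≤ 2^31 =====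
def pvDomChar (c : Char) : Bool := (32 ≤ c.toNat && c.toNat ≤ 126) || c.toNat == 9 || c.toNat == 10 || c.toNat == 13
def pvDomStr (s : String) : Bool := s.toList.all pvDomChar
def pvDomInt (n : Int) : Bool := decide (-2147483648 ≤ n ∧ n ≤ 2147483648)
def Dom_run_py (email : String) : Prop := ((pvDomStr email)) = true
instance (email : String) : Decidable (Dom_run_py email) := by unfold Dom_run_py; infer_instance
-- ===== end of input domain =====

set_option maxRecDepth 8000


-- B replaces A's three sequential full-string .replace passes by a single left-to-right scan
-- that tries each abbreviation at the current position; same output, one pass. Return value only.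

-- ===== PORT A =====
def run_py (email : String) : String :=
  ((PySem.Dict.mk [("WIP", "work in progress"), ("ASAP", "as soon as possible"),
      ("FYI", "for your information")]).items).foldl
    (fun email p => PySem.Str.replace email p.1 p.2) email

-- ===== PORT B =====
-- the while-loop of Source B as structural recursion over the remaining characters
def scanB : List Char → List Char
  | [] => []
  | c :: t =>
    if "WIP".toList.isPrefixOf (c :: t) then
      "work in progress".toList ++ scanB (List.drop 3 (c :: t))
    else if "ASAP".toList.isPrefixOf (c :: t) then
      "as soon as possible".toList ++ scanB (List.drop 4 (c :: t))
    else if "FYI".toList.isPrefixOf (c :: t) then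
      "for your information".toList ++ scanB (List.drop 3 (c :: t))
    else
      c :: scanB t
termination_by l => l.length
decreasing_by all_goals simp

def run_py_alt (email : String) : String := String.ofList (scanB email.toList)

-- ===== PRECONDITION & SPEC =====
def Spec_run_py (email : String) (out : String) : Prop := out = run_py_alt email
instance (email : String) (out : String) : Decidable (Spec_run_py email out) := by unfold Spec_run_py; infer_instance

-- ===== CLAIM (what is proved, stated in full; the proofs are below) =====
def Claim_equal_run_py : Prop := ∀ (email : String), Dom_run_py email → Spec_run_py email (run_py email)

-- ===== LEMMAS AND PROOFS =====

-- the simple recursive characterisation of Python's str.replace (for old ≠ [])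
def repl (old new : List Char) : List Char → List Char
  | [] => []
  | c :: t =>
    if old.isPrefixOf (c :: t) ∧ old ≠ [] then
      new ++ repl old new (List.drop old.length (c :: t))
    else
      c :: repl old new t
termination_by l => l.length
decreasing_by
  · rename_i h
    have : 1 ≤ old.length := by
      cases old with
      | nil => exact absurd rfl h.2
      | cons _ _ => simp
    simp [List.length_drop]; omega
  · simp

theorem replace_go_eq (old new : List Char) (hold : old ≠ []) :
    ∀ (fuel : Nat) (l acc : List Char), l.length ≤ fuel →
      PySem.Chars.replace.go old new fuel l acc = acc.reverse ++ repl old new l := by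
  intro fuel
  induction fuel with
  | zero =>
    intro l acc hl
    have : l = [] := by cases l <;> simp_all
    subst this
    simp [PySem.Chars.replace.go, repl]
  | succ n ih =>
    intro l acc hl
    cases l with
    | nil => simp [PySem.Chars.replace.go, repl]
    | cons c t =>
      rw [PySem.Chars.replace.go]
      by_cases hp : old.isPrefixOf (c :: t)
      · have h1 : 1 ≤ old.length := by
          cases old with
          | nil => exact absurd rfl hold
          | cons _ _ => simp
        rw [if_pos hp, ih _ _ (by simp at hl ⊢; omega)]
        rw [repl, if_pos ⟨hp, hold⟩]
        simp
      · rw [if_neg hp, ih _ _ (by simp at hl ⊢; omega)]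
        rw [repl, if_neg (by simp [hp])]
        simp

theorem replace_eq_repl (l old new : List Char) (hold : old ≠ []) :
    PySem.Chars.replace l old new = repl old new l := by
  rw [PySem.Chars.replace, if_neg (by simpa using hold)]
  simpa using replace_go_eq old new hold l.length l [] le_rfl

-- no match of (h0 :: old') can start inside u when h0 ∉ u
theorem repl_append (h0 : Char) (old' new : List Char) :
    ∀ (u v : List Char), h0 ∉ u →
      repl (h0 :: old') new (u ++ v) = u ++ repl (h0 :: old') new v := by
  intro u
  induction u with
  | nil => intro v _; simp
  | cons c u' ih =>
    intro v hu
    have hc : c ≠ h0 := by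
      intro h; exact hu (by simp [h])
    rw [List.cons_append, repl, if_neg]
    · rw [ih v (by intro h; exact hu (by simp [h]))]; simp
    · intro h
      have := h.1
      simp [List.isPrefixOf] at this
      exact hc this.1.symm

-- if p shares no character with new, a match of p at the front of the output
-- reflects to a match at the front of the input
theorem prefix_repl (old new : List Char) (hne : new ≠ []) :
    ∀ (p l : List Char), (∀ c ∈ p, c ∉ new) →
      p.isPrefixOf (repl old new l) → p.isPrefixOf l := by
  suffices H : ∀ (n : Nat) (p l : List Char), l.length ≤ n → (∀ c ∈ p, c ∉ new) →
      (p.isPrefixOf (repl old new l) → p.isPrefixOf l) from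
    fun p l hnew => H l.length p l le_rfl hnew
  intro n
  induction n with
  | zero =>
    intro p l hl hnew
    have : l = [] := by cases l <;> simp_all
    subst this
    intro h
    rw [repl] at h
    cases p with
    | nil => simp
    | cons q p' => simp [List.isPrefixOf] at h
  | succ n ih =>
    intro p l hl hnew
    cases l with
    | nil =>
      intro h
      rw [repl] at h
      cases p with
      | nil => simp
      | cons q p' => simp [List.isPrefixOf] at h
    | cons c t =>
      intro h
      rw [repl] at h
      by_cases hc : old.isPrefixOf (c :: t) = true ∧ old ≠ []
      · rw [if_pos hc] at h
        cases p with
        | nil => simp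
        | cons q p' =>
          exfalso
          cases new with
          | nil => exact hne rfl
          | cons n0 new' =>
            simp [List.isPrefixOf] at h
            exact hnew q (by simp) (by simp [h.1])
      · rw [if_neg hc] at h
        cases p with
        | nil => simp
        | cons q p' =>
          simp [List.isPrefixOf] at h ⊢
          refine ⟨h.1, ?_⟩
          exact List.isPrefixOf_iff_prefix.mp (ih p' t (by simp at hl ⊢; omega)
            (fun x hx => hnew x (by simp [hx]))
            (by simpa [List.isPrefixOf] using h.2))

-- a match at the front is replaced and the scan continues after it
theorem repl_match (h0 : Char) (old' new v : List Char) :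
    repl (h0 :: old') new ((h0 :: old') ++ v) = new ++ repl (h0 :: old') new v := by
  rw [List.cons_append, repl, if_pos]
  · congr 1
    show repl (h0 :: old') new (List.drop old'.length (old' ++ v)) = repl (h0 :: old') new v
    rw [List.drop_left]
  · refine ⟨?_, by simp⟩
    simp [List.isPrefixOf_iff_prefix]

theorem main_eq : ∀ (l : List Char),
    repl "FYI".toList "for your information".toList
      (repl "ASAP".toList "as soon as possible".toList
        (repl "WIP".toList "work in progress".toList l)) = scanB l := by
  suffices H : ∀ (n : Nat) (l : List Char), l.length ≤ n →
      repl "FYI".toList "for your information".toList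
        (repl "ASAP".toList "as soon as possible".toList
          (repl "WIP".toList "work in progress".toList l)) = scanB l from
    fun l => H l.length l le_rfl
  intro n
  induction n with
  | zero =>
    intro l hl
    have : l = [] := by cases l <;> simp_all
    subst this
    simp [repl, scanB]
  | succ n ih =>
    intro l hl
    have eW : "WIP".toList = 'W' :: "IP".toList := rfl
    have eA : "ASAP".toList = 'A' :: "SAP".toList := rfl
    have eF : "FYI".toList = 'F' :: "YI".toList := rfl
    cases l with
    | nil => simp [repl, scanB]
    | cons c t =>
      by_cases h1 : "WIP".toList.isPrefixOf (c :: t)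
      · -- WIP matches here
        obtain ⟨r, hr⟩ := List.isPrefixOf_iff_prefix.mp h1
        have hlh := congrArg List.length hr
        rw [List.length_append, show ("WIP".toList).length = 3 from rfl] at hlh
        have hlen : r.length < (c :: t).length := by omega
        have hd3 : List.drop 3 (c :: t) = r := by rw [← hr]; rfl
        rw [← hr, eW, repl_match 'W' "IP".toList, ← eW]
        rw [eA, repl_append 'A' "SAP".toList _ "work in progress".toList _ (by decide), ← eA]
        rw [eF, repl_append 'F' "YI".toList _ "work in progress".toList _ (by decide), ← eF]
        rw [ih r (by omega)]
        rw [hr, scanB, if_pos h1, hd3]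
      · by_cases h2 : "ASAP".toList.isPrefixOf (c :: t)
        · obtain ⟨r, hr⟩ := List.isPrefixOf_iff_prefix.mp h2
          have hlh := congrArg List.length hr
          rw [List.length_append, show ("ASAP".toList).length = 4 from rfl] at hlh
          have hlen : r.length < (c :: t).length := by omega
          have hd4 : List.drop 4 (c :: t) = r := by rw [← hr]; rfl
          rw [← hr]
          rw [eW, repl_append 'W' "IP".toList _ "ASAP".toList _ (by decide), ← eW]
          rw [eA, repl_match 'A' "SAP".toList, ← eA]
          rw [eF, repl_append 'F' "YI".toList _ "as soon as possible".toList _ (by decide), ← eF]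
          rw [ih r (by omega)]
          rw [hr, scanB, if_neg h1, if_pos h2, hd4]
        · by_cases h3 : "FYI".toList.isPrefixOf (c :: t)
          · obtain ⟨r, hr⟩ := List.isPrefixOf_iff_prefix.mp h3
            have hlh := congrArg List.length hr
            rw [List.length_append, show ("FYI".toList).length = 3 from rfl] at hlh
            have hlen : r.length < (c :: t).length := by omega
            have hd3 : List.drop 3 (c :: t) = r := by rw [← hr]; rfl
            rw [← hr]
            rw [eW, repl_append 'W' "IP".toList _ "FYI".toList _ (by decide), ← eW]
            rw [eA, repl_append 'A' "SAP".toList _ "FYI".toList _ (by decide), ← eA]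
            rw [eF, repl_match 'F' "YI".toList, ← eF]
            rw [ih r (by omega)]
            rw [hr, scanB, if_neg h1, if_neg h2, if_pos h3, hd3]
          · -- no abbreviation matches at this position
            have e1 : repl "WIP".toList "work in progress".toList (c :: t) =
                c :: repl "WIP".toList "work in progress".toList t := by
              rw [repl, if_neg (fun hh => h1 hh.1)]
            have h2' : ¬ "ASAP".toList.isPrefixOf
                (c :: repl "WIP".toList "work in progress".toList t) := by
              intro h
              rw [← e1] at h
              exact h2 (prefix_repl "WIP".toList "work in progress".toList (by decide) "ASAP".toList _ (by intro x hx; fin_cases hx <;> decide) h)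
            have e2 : repl "ASAP".toList "as soon as possible".toList
                (c :: repl "WIP".toList "work in progress".toList t) =
                c :: repl "ASAP".toList "as soon as possible".toList
                  (repl "WIP".toList "work in progress".toList t) := by
              rw [repl, if_neg (fun hh => h2' hh.1)]
            have h3' : ¬ "FYI".toList.isPrefixOf
                (c :: repl "ASAP".toList "as soon as possible".toList
                  (repl "WIP".toList "work in progress".toList t)) := by
              intro h
              rw [← e2, ← e1] at h
              have := prefix_repl "ASAP".toList "as soon as possible".toList (by decide) "FYI".toList _ (by intro x hx; fin_cases hx <;> decide) h
              have := prefix_repl "WIP".toList "work in progress".toList (by decide) "FYI".toList _ (by intro x hx; fin_cases hx <;> decide) this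
              exact h3 this
            rw [e1, e2, repl, if_neg (fun hh => h3' hh.1)]
            rw [ih t (by simp at hl; omega)]
            rw [scanB, if_neg h1, if_neg h2, if_neg h3]

-- ===== VERDICT (by name: the statement is the Claim_ definition above) =====
theorem run_py_spec : Claim_equal_run_py := by
  intro email _
  unfold Spec_run_py run_py run_py_alt
  simp only [List.foldl]
  simp only [PySem.Str.replace]
  rw [show (String.ofList (PySem.Chars.replace email.toList "WIP".toList
      "work in progress".toList)).toList = PySem.Chars.replace email.toList "WIP".toList
      "work in progress".toList from by simp]
  rw [show (String.ofList (PySem.Chars.replace (PySem.Chars.replace email.toList "WIP".toList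
      "work in progress".toList) "ASAP".toList "as soon as possible".toList)).toList =
      PySem.Chars.replace (PySem.Chars.replace email.toList "WIP".toList
      "work in progress".toList) "ASAP".toList "as soon as possible".toList from by simp]
  rw [replace_eq_repl _ _ _ (by decide), replace_eq_repl _ _ _ (by decide),
      replace_eq_repl _ _ _ (by decide), main_eq]
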